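-- pv_equiv track=rewrite | github.com/mi478556/SimWork-UI | utils/time_series.py | event_intervals
-- ===== SOURCE A (Python) =====
-- from typing import Iterable, Tuple, List
--
-- def event_intervals(mask: Iterable[bool]) -> List[Tuple[int, int]]:
--
--
--     mask = list(mask)
--     intervals = []
--     start = None
--
--     for i, v in enumerate(mask):
--         if v and start is None:
--             start = i
--         elif not v and start is not None:
--             intervals.append((start, i))
--             start = None
--
--     if start is not None:
--         intervals.append((start, len(mask)))
--
--     return intervals
-- ===== SOURCE B (Python) =====
-- from typing import Iterable, Tuple, List
--
-- def event_intervals(mask: Iterable[bool]) -> List[Tuple[int, int]]: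
--     # Boundary detection: rising edges give run starts, falling edges give run ends.
--     lst = list(mask)
--     starts = [i for i, (p, v) in enumerate(zip([False] + lst, lst)) if v and not p]
--     ends = [i + 1 for i, (v, nx) in enumerate(zip(lst, lst[1:] + [False])) if v and not nx]
--     return list(zip(starts, ends))
-- ===== Notes on version B (the rewrite author's own statement) =====
-- stated objective: alternative
-- what changed: Replaces the single stateful start/None accumulator loop with two stateless boundary-detection passes (rising-edge indices as starts, falling-edge indices as ends) joined by zip.
import Mathlib
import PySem

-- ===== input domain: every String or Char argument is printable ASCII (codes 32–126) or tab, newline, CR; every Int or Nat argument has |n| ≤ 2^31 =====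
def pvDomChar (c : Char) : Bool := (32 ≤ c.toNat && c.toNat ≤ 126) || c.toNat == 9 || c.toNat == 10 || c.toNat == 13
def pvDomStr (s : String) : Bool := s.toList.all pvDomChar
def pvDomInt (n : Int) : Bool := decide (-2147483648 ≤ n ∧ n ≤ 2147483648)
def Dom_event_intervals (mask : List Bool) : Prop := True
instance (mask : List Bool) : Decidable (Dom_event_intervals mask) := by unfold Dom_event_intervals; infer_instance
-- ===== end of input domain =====

-- B replaces A's single stateful start/None accumulator loop by two stateless
-- boundary-detection passes (rising edges = starts, falling edges = ends) joined by zip;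
-- objective: alternative decomposition, same cost.

-- ===== PORT A =====
def event_intervals (mask : List Bool) : List (Int × Int) :=
  let st := (PySem.List.enumerate mask).foldl
    (fun (st : List (Int × Int) × Option Int) (iv : Int × Bool) =>
      match st, iv with
      | (acc, none), (i, v) => if v then (acc, some i) else (acc, none)
      | (acc, some s), (i, v) => if v then (acc, some s) else (acc ++ [(s, i)], none))
    ([], none)
  match st.2 with
  | some s => st.1 ++ [(s, (mask.length : Int))]
  | none => st.1

-- ===== PORT B =====
def event_intervals_alt (mask : List Bool) : List (Int × Int) :=
  ((PySem.List.enumerate ((false :: mask).zip mask)).filterMap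
    (fun x => if x.2.2 && !x.2.1 then some x.1 else none)).zip
  ((PySem.List.enumerate (mask.zip (mask.drop 1 ++ [false]))).filterMap
    (fun x => if x.2.1 && !x.2.2 then some (x.1 + 1) else none))

-- ===== PRECONDITION & SPEC =====
def Spec_event_intervals (mask : List Bool) (out : List (Int × Int)) : Prop := out = event_intervals_alt mask
instance (mask : List Bool) (out : List (Int × Int)) : Decidable (Spec_event_intervals mask out) := by unfold Spec_event_intervals; infer_instance

-- ===== CLAIM (what is proved, stated in full; the proofs are below) =====
def Claim_equal_event_intervals : Prop := ∀ (mask : List Bool), Dom_event_intervals mask → Spec_event_intervals mask (event_intervals mask)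

-- ===== LEMMAS AND PROOFS =====

-- Canonical recursions: runs of A's loop, split by loop state (outside / inside a run).
mutual
def pvRunsNone (i : Int) : List Bool → List (Int × Int)
  | [] => []
  | v :: t => if v then pvRunsSome i (i + 1) t else pvRunsNone (i + 1) t
def pvRunsSome (s i : Int) : List Bool → List (Int × Int)
  | [] => [(s, i)]
  | v :: t => if v then pvRunsSome s (i + 1) t else (s, i) :: pvRunsNone (i + 1) t
end

-- Edge lists: rising / falling edge positions given the previous value p.
def pvRises (i : Int) (p : Bool) : List Bool → List Int
  | [] => []
  | v :: t => (if v && !p then [i] else []) ++ pvRises (i + 1) v t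

def pvFalls (i : Int) (p : Bool) : List Bool → List Int
  | [] => if p then [i] else []
  | v :: t => (if p && !v then [i] else []) ++ pvFalls (i + 1) v t

def pvStep : List (Int × Int) × Option Int → Int × Bool → List (Int × Int) × Option Int :=
  fun st iv =>
    match st, iv with
    | (acc, none), (i, v) => if v then (acc, some i) else (acc, none)
    | (acc, some s), (i, v) => if v then (acc, some s) else (acc ++ [(s, i)], none)

def pvFinish (st : List (Int × Int) × Option Int) (n : Int) : List (Int × Int) :=
  match st.2 with
  | some s => st.1 ++ [(s, n)]
  | none => st.1

lemma pvFoldA (t : List Bool) : ∀ (i : Int) (acc : List (Int × Int)),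
    (pvFinish ((PySem.List.enumerate t i).foldl pvStep (acc, none)) (i + (t.length : Int))
      = acc ++ pvRunsNone i t)
    ∧ ∀ s, pvFinish ((PySem.List.enumerate t i).foldl pvStep (acc, some s)) (i + (t.length : Int))
      = acc ++ pvRunsSome s i t := by
  induction t with
  | nil => intro i acc; simp [pvFinish, pvRunsNone, pvRunsSome, PySem.List.enumerate_nil]
  | cons v t ih =>
    intro i acc
    have hL : i + (((v :: t).length : Nat) : Int) = (i + 1) + (t.length : Int) := by
      push_cast [List.length_cons]; ring
    rw [PySem.List.enumerate_cons]
    constructor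
    · rw [hL]
      simp only [List.foldl_cons, pvStep]
      cases v
      · simpa [pvRunsNone] using (ih (i + 1) acc).1
      · simpa [pvRunsNone] using (ih (i + 1) acc).2 i
    · intro s
      rw [hL]
      simp only [List.foldl_cons, pvStep]
      cases v
      · simpa [pvRunsSome] using (ih (i + 1) (acc ++ [(s, i)])).1
      · simpa [pvRunsSome] using (ih (i + 1) acc).2 s

lemma pvZipEdges (t : List Bool) : ∀ (i : Int),
    (pvRunsNone i t = (pvRises i false t).zip (pvFalls i false t))
    ∧ ∀ s, pvRunsSome s i t = (s :: pvRises i true t).zip (pvFalls i true t) := by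
  induction t with
  | nil => intro i; simp [pvRunsNone, pvRunsSome, pvRises, pvFalls]
  | cons v t ih =>
    intro i
    constructor
    · cases v with
      | true => simpa [pvRunsNone, pvRises, pvFalls] using (ih (i + 1)).2 i
      | false => simpa [pvRunsNone, pvRises, pvFalls] using (ih (i + 1)).1
    · intro s
      cases v with
      | true => simpa [pvRunsSome, pvRises, pvFalls] using (ih (i + 1)).2 s
      | false => simpa [pvRunsSome, pvRises, pvFalls] using (ih (i + 1)).1

lemma pvStartsEq (l : List Bool) : ∀ (p : Bool) (i : Int),
    ((PySem.List.enumerate ((p :: l).zip l) i).filterMap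
      (fun x => if x.2.2 && !x.2.1 then some x.1 else none)) = pvRises i p l := by
  induction l with
  | nil => intro p i; simp [pvRises, PySem.List.enumerate_nil]
  | cons v t ih =>
    intro p i
    rw [show (p :: v :: t).zip (v :: t) = (p, v) :: (v :: t).zip t from rfl,
        PySem.List.enumerate_cons, List.filterMap_cons, ih v (i + 1)]
    cases hv : (v && !p) <;> simp [pvRises, hv]

lemma pvEndsAux (l : List Bool) : ∀ (v : Bool) (i : Int),
    ((PySem.List.enumerate ((v :: l).zip ((v :: l).drop 1 ++ [false])) i).filterMap
      (fun x => if x.2.1 && !x.2.2 then some (x.1 + 1) else none)) = pvFalls (i + 1) v l := by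
  induction l with
  | nil =>
    intro v i
    cases v <;> simp [pvFalls, PySem.List.enumerate_cons, PySem.List.enumerate_nil]
  | cons w t ih =>
    intro v i
    rw [show (v :: w :: t).zip ((v :: w :: t).drop 1 ++ [false])
          = (v, w) :: (w :: t).zip ((w :: t).drop 1 ++ [false]) from rfl,
        PySem.List.enumerate_cons, List.filterMap_cons, ih w (i + 1)]
    cases hv : (v && !w) <;> simp [pvFalls, hv]

lemma pvEndsEq (l : List Bool) :
    ((PySem.List.enumerate (l.zip (l.drop 1 ++ [false])) 0).filterMap
      (fun x => if x.2.1 && !x.2.2 then some (x.1 + 1) else none)) = pvFalls 0 false l := by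
  cases l with
  | nil => simp [pvFalls, PySem.List.enumerate_nil]
  | cons v t =>
    have := pvEndsAux t v 0
    simpa [pvFalls] using this

lemma pvAltEq (mask : List Bool) :
    event_intervals_alt mask = (pvRises 0 false mask).zip (pvFalls 0 false mask) := by
  rw [event_intervals_alt, pvStartsEq mask false 0, pvEndsEq mask]

lemma pvAEq (mask : List Bool) : event_intervals mask = pvRunsNone 0 mask := by
  unfold event_intervals
  have h := (pvFoldA mask 0 []).1
  simp only [zero_add] at h
  simpa [pvFinish] using h

-- ===== VERDICT (by name: the statement is the Claim_ definition above) =====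
theorem event_intervals_spec : Claim_equal_event_intervals := by
  intro mask _
  unfold Spec_event_intervals
  rw [pvAEq, pvAltEq, (pvZipEdges mask 0).1]
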